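-- pv_equiv track=rewrite | github.com/talipovm/vbt3 | vbt3/functions.py | sorti
-- ===== SOURCE A (Python) =====
-- def sorti(s):
--     s2 = s
--     nperms = 0
--     for i in range(len(s) - 1):
--         jmin = i
--         for j in range(i + 1, len(s)):
--             if s2[j] < s2[jmin]:
--                 jmin = j
--         if jmin != i:
--             s2 = s2[:i] + s2[jmin] + s2[i + 1:jmin] + s2[i] + s2[jmin + 1:]
--             nperms += 1
--     return s2, nperms
-- ===== SOURCE B (Python) =====
-- def sorti(s):
--     # Sort via sorted(); single patching pass computes the same swap count.
--     t = sorted(s)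
--     cur = list(s)
--     nperms = 0
--     for i in range(len(s) - 1):
--         if cur[i] != t[i]:
--             m = cur.index(t[i], i + 1)
--             cur[m] = cur[i]
--             cur[i] = t[i]
--             nperms += 1
--     return ''.join(t), nperms
-- ===== Notes on version B (the rewrite author's own statement) =====
-- stated objective: faster
-- what changed: Instead of A's selection sort (an inner min-scan over the whole suffix at every step plus O(n) string re-slicing per swap), B gets the sorted string from sorted() and makes one patching pass over a char list, searching for the target char only at mismatching positions and swapping by two point assignments; the swap count provably coincides with A's.
import Mathlib
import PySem

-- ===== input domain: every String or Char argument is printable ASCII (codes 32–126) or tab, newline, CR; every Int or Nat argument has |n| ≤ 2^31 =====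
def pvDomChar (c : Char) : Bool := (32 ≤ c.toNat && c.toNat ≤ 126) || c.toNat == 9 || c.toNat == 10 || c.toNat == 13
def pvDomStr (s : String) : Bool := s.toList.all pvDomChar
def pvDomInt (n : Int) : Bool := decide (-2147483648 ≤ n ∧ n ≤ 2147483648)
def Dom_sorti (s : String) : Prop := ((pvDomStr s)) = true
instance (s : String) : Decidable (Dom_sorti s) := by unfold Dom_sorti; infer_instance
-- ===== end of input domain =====

-- B replaces A's repeated inner min-scans and per-swap string re-slicing by sorted() plus one
-- patching pass with point updates; same return value (sorted string, swap count).

-- ===== PORT A =====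
-- loop body of A's outer 'for i in range(len(s)-1)' (n = len(s), fixed; state = (s2, nperms))
def sortiStepA (n : Int) (st : List Char × Int) (i : Int) : List Char × Int :=
  let s2 := st.1
  let jmin := (PySem.List.pyRange (i + 1) n).foldl
    (fun jmin j =>
      match PySem.List.pyGet? s2 j, PySem.List.pyGet? s2 jmin with
      | some a, some b => if a < b then j else jmin
      | _, _ => jmin) i
  if jmin ≠ i then
    (PySem.List.slice s2 none (some i) ++ (PySem.List.pyGet? s2 jmin).toList
       ++ PySem.List.slice s2 (some (i + 1)) (some jmin) ++ (PySem.List.pyGet? s2 i).toList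
       ++ PySem.List.slice s2 (some (jmin + 1)) none,
     st.2 + 1)
  else st

def sorti (s : String) : String × Int :=
  let cs := s.toList
  let n : Int := (cs.length : Int)
  let st := (PySem.List.pyRange 0 (n - 1)).foldl (sortiStepA n) (cs, 0)
  (String.ofList st.1, st.2)

-- ===== PORT B =====
-- loop body of B's 'for i in range(len(s)-1)' (t = sorted(s), fixed; state = (cur, nperms))
def sortiStepB (t : List Char) (st : List Char × Int) (i : Int) : List Char × Int :=
  let cur := st.1
  match PySem.List.pyGet? cur i, PySem.List.pyGet? t i with
  | some a, some c =>
    if a ≠ c then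
      -- m = cur.index(t[i], i + 1)  (the char is always found there; see the invariant proof)
      let m : Int := i + 1 +
        ((PySem.List.index? (PySem.List.slice cur (some (i + 1)) none) c).getD 0 : Nat)
      ((cur.set m.toNat a).set i.toNat c, st.2 + 1)
    else st
  | _, _ => st

def sorti_alt (s : String) : String × Int :=
  let cs := s.toList
  let t := PySem.List.sorted cs (fun c => c) false
  let st := (PySem.List.pyRange 0 ((cs.length : Int) - 1)).foldl (sortiStepB t) (cs, 0)
  (String.ofList t, st.2)

-- ===== PRECONDITION & SPEC =====
def Spec_sorti (s : String) (out : String × Int) : Prop := out = sorti_alt s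
instance (s : String) (out : String × Int) : Decidable (Spec_sorti s out) := by unfold Spec_sorti; infer_instance

-- ===== CLAIM (what is proved, stated in full; the proofs are below) =====
def Claim_equal_sorti : Prop := ∀ (s : String), Dom_sorti s → Spec_sorti s (sorti s)

-- ===== LEMMAS AND PROOFS =====

theorem pvRange_nil {a b : Int} (h : b ≤ a) : PySem.List.pyRange a b = [] := by
  apply List.eq_nil_iff_forall_not_mem.2
  intro x hx
  rw [PySem.List.mem_pyRange_one] at hx
  omega

theorem pvRange_natCast : ∀ (d a b : Nat), a + d = b →
    PySem.List.pyRange (a : Int) (b : Int) = List.map (fun k : Nat => (k : Int)) (List.range' a d) := by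
  intro d
  induction d with
  | zero =>
    intro a b h
    rw [pvRange_nil (by exact_mod_cast Nat.cast_le.mpr (by omega : b ≤ a))]
    simp
  | succ d ih =>
    intro a b h
    rw [PySem.List.pyRange_one_cons (by omega), List.range'_succ]
    have hc : ((a : Int) + 1) = ((a + 1 : Nat) : Int) := by push_cast; ring
    rw [hc, ih (a + 1) b (by omega)]
    simp

theorem pvPerm_drop {cur t : List Char} (i : Nat) (hp : cur.Perm t)
    (ht : cur.take i = t.take i) : (cur.drop i).Perm (t.drop i) := by
  have h1 := List.take_append_drop i cur
  have h2 := List.take_append_drop i t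
  rw [← h1, ← h2, ht, List.perm_append_left_iff] at hp
  exact hp

theorem pvEq_of_perm_take {cur t : List Char} (hp : cur.Perm t)
    (ht : cur.take (t.length - 1) = t.take (t.length - 1)) : cur = t := by
  have hd := pvPerm_drop (t.length - 1) hp ht
  have hdrop : cur.drop (t.length - 1) = t.drop (t.length - 1) := by
    rcases e : t.drop (t.length - 1) with _ | ⟨b, l'⟩
    · rw [e] at hd; exact List.perm_nil.1 hd
    · have hl : (t.drop (t.length - 1)).length = t.length - (t.length - 1) := List.length_drop ..
      rw [e] at hl
      have : l' = [] := by
        simp only [List.length_cons] at hl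
        exact List.eq_nil_of_length_eq_zero (by omega)
      subst this
      rw [e] at hd
      exact List.perm_singleton.1 hd
  calc cur = cur.take (t.length - 1) ++ cur.drop (t.length - 1) := (List.take_append_drop _ _).symm
    _ = t.take (t.length - 1) ++ t.drop (t.length - 1) := by rw [ht, hdrop]
    _ = t := List.take_append_drop _ _

-- generic swap permutation
theorem pvPerm_swap {α : Type} (a b : α) (mid rest : List α) :
    (a :: (mid ++ b :: rest)).Perm (b :: (mid ++ a :: rest)) :=
  ((List.perm_middle).cons a).trans
    ((List.Perm.swap b a (mid ++ rest)).trans ((List.perm_middle.symm).cons b))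

-- the inner argmin loop of A returns the LEAST index of the minimum of the suffix
theorem pvInner_spec (l : List Char) (i : Nat) :
    ∀ (d j0 jn : Nat), j0 + d = l.length → i ≤ jn → jn < j0 →
    (∀ j, i ≤ j → j < j0 → l.getD jn ' ' ≤ l.getD j ' ') →
    (∀ j, i ≤ j → j < jn → l.getD jn ' ' < l.getD j ' ') →
    ∃ rn : Nat,
      (List.map (fun k : Nat => (k : Int)) (List.range' j0 d)).foldl
        (fun jmin j =>
          match PySem.List.pyGet? l j, PySem.List.pyGet? l jmin with
          | some a, some b => if a < b then j else jmin
          | _, _ => jmin) (jn : Int) = (rn : Int) ∧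
      i ≤ rn ∧ rn < l.length ∧
      (∀ j, i ≤ j → j < l.length → l.getD rn ' ' ≤ l.getD j ' ') ∧
      (∀ j, i ≤ j → j < rn → l.getD rn ' ' < l.getD j ' ') := by
  intro d
  induction d with
  | zero =>
    intro j0 jn hlen hij hjn h1 h2
    exact ⟨jn, by simp, hij, by omega, fun j hj hjl => h1 j hj (by omega), h2⟩
  | succ d ih =>
    intro j0 jn hlen hij hjn h1 h2
    have hj0 : j0 < l.length := by omega
    have hjnl : jn < l.length := by omega
    rw [List.range'_succ]
    simp only [List.map_cons, List.foldl_cons]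
    have e1 : PySem.List.pyGet? l (j0 : Int) = some (l.getD j0 ' ') := by
      rw [PySem.List.pyGet?_natCast, List.getElem?_eq_getElem hj0, List.getD_eq_getElem l ' ' hj0]
    have e2 : PySem.List.pyGet? l (jn : Int) = some (l.getD jn ' ') := by
      rw [PySem.List.pyGet?_natCast, List.getElem?_eq_getElem hjnl, List.getD_eq_getElem l ' ' hjnl]
    rw [e1, e2]
    by_cases hc : l.getD j0 ' ' < l.getD jn ' '
    · simp only [hc, if_true]
      exact ih (j0 + 1) j0 (by omega) (by omega) (by omega)
        (fun j hj hjl => by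
          rcases Nat.lt_or_ge j j0 with h | h
          · exact le_of_lt (lt_of_lt_of_le hc (h1 j hj h))
          · have hjj : j = j0 := by omega
            subst hjj; exact le_refl _)
        (fun j hj hjl => lt_of_lt_of_le hc (h1 j hj (by omega)))
    · simp only [hc, if_false]
      exact ih (j0 + 1) jn (by omega) hij (by omega)
        (fun j hj hjl => by
          rcases Nat.lt_or_ge j j0 with h | h
          · exact h1 j hj h
          · have hjj : j = j0 := by omega
            subst hjj; exact not_lt.1 hc)
        h2

-- the double point-update is exactly A's slice concatenation
theorem pvSwap_concat (l : List Char) (i m : Nat) (him : i < m) (hm : m < l.length) :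
    (l.set m (l.getD i ' ')).set i (l.getD m ' ')
      = l.take i ++ l.getD m ' ' :: (List.take (m - (i + 1)) (l.drop (i + 1))
          ++ l.getD i ' ' :: l.drop (m + 1)) := by
  have hi : i < l.length := by omega
  have hlen' : i < (l.set m (l.getD i ' ')).length := by rw [List.length_set]; omega
  rw [List.set_eq_take_append_cons_drop (l := l.set m (l.getD i ' ')), if_pos hlen']
  have htake : (l.set m (l.getD i ' ')).take i = l.take i := by
    rw [List.take_set]
    exact List.set_eq_of_length_le (by rw [List.length_take]; omega)
  have hdrop : (l.set m (l.getD i ' ')).drop (i + 1)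
      = (l.drop (i + 1)).set (m - (i + 1)) (l.getD i ' ') := by
    rw [List.drop_set, if_neg (by omega)]
  rw [htake, hdrop]
  have hmlen : m - (i + 1) < (l.drop (i + 1)).length := by rw [List.length_drop]; omega
  rw [List.set_eq_take_append_cons_drop, if_pos hmlen, List.drop_drop]
  have : i + 1 + (m - (i + 1) + 1) = m + 1 := by omega
  rw [this]

-- main loop lemma: from any state satisfying the invariant, both loops finish in (t, same count)
theorem pvMain (cs : List Char) :
    ∀ (d i : Nat) (cur : List Char) (np : Int),
      i + d = cs.length - 1 →
      cur.Perm (PySem.List.sorted cs (fun c => c) false) →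
      cur.take i = (PySem.List.sorted cs (fun c => c) false).take i →
      ∃ r : Int,
        (List.map (fun k : Nat => (k : Int)) (List.range' i d)).foldl
            (sortiStepA (cs.length : Int)) (cur, np)
          = (PySem.List.sorted cs (fun c => c) false, r) ∧
        (List.map (fun k : Nat => (k : Int)) (List.range' i d)).foldl
            (sortiStepB (PySem.List.sorted cs (fun c => c) false)) (cur, np)
          = (PySem.List.sorted cs (fun c => c) false, r) := by
  intro d
  induction d with
  | zero =>
    intro i cur np hsum hp ht
    have htl : (PySem.List.sorted cs (fun c => c) false).length = cs.length :=
      (PySem.List.sorted_perm _ _ _).length_eq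
    have hcur : cur = PySem.List.sorted cs (fun c => c) false :=
      pvEq_of_perm_take hp (by rw [htl]; rw [(by omega : cs.length - 1 = i)]; exact ht)
    exact ⟨np, by simp [hcur], by simp [hcur]⟩
  | succ d ih =>
    intro i cur np hsum hp ht
    set t := PySem.List.sorted cs (fun c => c) false with htdef
    have htl : t.length = cs.length := (PySem.List.sorted_perm _ _ _).length_eq
    have hcl : cur.length = cs.length := hp.length_eq.trans htl
    have hn2 : i + 1 < cs.length := by omega
    have hi : i < cur.length := by omega
    have hti : i < t.length := by omega
    rw [List.range'_succ]
    simp only [List.map_cons, List.foldl_cons]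
    -- characterize A's inner argmin loop
    have hstepA : sortiStepA (cs.length : Int) (cur, np) (i : Nat) =
        sortiStepA (cs.length : Int) (cur, np) ((i : Nat) : Int) := rfl
    obtain ⟨rn, hfold, hrni, hrnl, hmin, hstrict⟩ :=
      pvInner_spec cur i (cs.length - (i + 1)) (i + 1) i (by omega) (le_refl i) (by omega)
        (fun j hj hjl => by
          have : j = i := by omega
          subst this; exact le_refl _)
        (fun j hj hjl => absurd hjl (by omega))
    -- suffix permutation facts
    have hps : (cur.drop i).Perm (t.drop i) := pvPerm_drop i hp ht
    have hdt : t.drop i = t.getD i ' ' :: t.drop (i + 1) := by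
      rw [List.drop_eq_getElem_cons hti, List.getD_eq_getElem t ' ' hti]
    have hpw : ∀ y ∈ t.drop (i + 1), t.getD i ' ' ≤ y := by
      have h0 : List.Pairwise (fun a b : Char => a ≤ b) t := PySem.List.sorted_pairwise cs (fun c => c)
      have h1 : List.Pairwise (fun a b : Char => a ≤ b) (t.drop i) := h0.drop
      rw [hdt, List.pairwise_cons] at h1
      exact h1.1
    have hm1 : ∀ x ∈ cur.drop i, t.getD i ' ' ≤ x := by
      intro x hx
      have hx' : x ∈ t.drop i := hps.subset hx
      rw [hdt] at hx'
      rcases List.mem_cons.1 hx' with h | h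
      · subst h; exact le_refl _
      · exact hpw x h
    have hm2 : t.getD i ' ' ∈ cur.drop i := by
      apply hps.symm.subset
      rw [hdt]; exact List.mem_cons_self
    have hmemd : ∀ j, i ≤ j → j < cur.length → cur.getD j ' ' ∈ cur.drop i := by
      intro j hj hjl
      rw [List.getD_eq_getElem cur ' ' hjl]
      refine List.mem_iff_getElem.2 ⟨j - i, by rw [List.length_drop]; omega, ?_⟩
      rw [List.getElem_drop]
      congr 1
      omega
    have hm1' : ∀ j, i ≤ j → j < cur.length → t.getD i ' ' ≤ cur.getD j ' ' :=
      fun j hj hjl => hm1 _ (hmemd j hj hjl)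
    have hm2' : ∃ m', i ≤ m' ∧ m' < cur.length ∧ cur.getD m' ' ' = t.getD i ' ' := by
      obtain ⟨k, hk, hke⟩ := List.mem_iff_getElem.1 hm2
      rw [List.length_drop] at hk
      refine ⟨i + k, by omega, by omega, ?_⟩
      rw [List.getD_eq_getElem cur ' ' (by omega), ← hke, List.getElem_drop]
    -- element reads
    have ecuri : PySem.List.pyGet? cur (i : Nat) = some (cur.getD i ' ') := by
      rw [PySem.List.pyGet?_natCast, List.getElem?_eq_getElem hi, List.getD_eq_getElem cur ' ' hi]
    have eti : PySem.List.pyGet? t (i : Nat) = some (t.getD i ' ') := by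
      rw [PySem.List.pyGet?_natCast, List.getElem?_eq_getElem hti, List.getD_eq_getElem t ' ' hti]
    by_cases hcase : cur.getD i ' ' = t.getD i ' '
    · -- no swap on either side
      have hrn : rn = i := by
        by_contra hne
        have hlt : i < rn := by omega
        have h1 := hstrict i (le_refl i) hlt
        have h2 := hm1' rn hrni hrnl
        rw [hcase] at h1
        exact absurd (lt_of_le_of_lt h2 h1) (lt_irrefl _)
      rw [hrn] at hfold
      have hA : sortiStepA (cs.length : Int) (cur, np) (i : Nat) = (cur, np) := by
        simp only [sortiStepA]
        rw [(by push_cast; ring : ((i : Nat) : Int) + 1 = ((i + 1 : Nat) : Int)),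
          pvRange_natCast (cs.length - (i + 1)) (i + 1) cs.length (by omega)]
        rw [show cur = (cur, np).1 from rfl] at hfold
        rw [hfold]
        simp
      have hB : sortiStepB t (cur, np) (i : Nat) = (cur, np) := by
        simp only [sortiStepB]
        simp only [ecuri, eti]
        have hg : cur[i]?.getD ' ' = t[i]?.getD ' ' := by
          rw [List.getElem?_eq_getElem hi, List.getElem?_eq_getElem hti]
          rw [List.getD_eq_getElem cur ' ' hi, List.getD_eq_getElem t ' ' hti] at hcase
          simpa using hcase
        simp [hg]
      rw [hA, hB]
      apply ih (i + 1) cur np (by omega) hp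
      rw [List.take_add_one, List.take_add_one, ht, List.getElem?_eq_getElem hi,
        List.getElem?_eq_getElem hti, ← List.getD_eq_getElem cur ' ' hi,
        ← List.getD_eq_getElem t ' ' hti, hcase]
    · -- swap on both sides
      have hlt : t.getD i ' ' < cur.getD i ' ' :=
        lt_of_le_of_ne (hm1' i (le_refl i) hi) (fun h => hcase h.symm)
      have hrnv : cur.getD rn ' ' = t.getD i ' ' := by
        obtain ⟨m', hm'1, hm'2, hm'3⟩ := hm2'
        exact le_antisymm (by rw [← hm'3]; exact hmin m' hm'1 hm'2) (hm1' rn hrni hrnl)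
      have hirn : i < rn := by
        rcases Nat.lt_or_ge i rn with h | h
        · exact h
        · have : rn = i := by omega
          subst this
          exact absurd hrnv hcase
      -- decomposition of the suffix at rn
      have hdec : cur.drop (i + 1)
          = List.take (rn - (i + 1)) (cur.drop (i + 1)) ++ t.getD i ' ' :: cur.drop (rn + 1) := by
        conv_lhs => rw [← List.take_append_drop (rn - (i + 1)) (cur.drop (i + 1))]
        congr 1
        rw [List.drop_drop, (by omega : i + 1 + (rn - (i + 1)) = rn),
          List.drop_eq_getElem_cons (by omega : rn < cur.length),
          ← List.getD_eq_getElem cur ' ' (by omega : rn < cur.length), hrnv]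
      have hpre_len : (List.take (rn - (i + 1)) (cur.drop (i + 1))).length = rn - (i + 1) := by
        rw [List.length_take, List.length_drop]; omega
      have hnotmem : t.getD i ' ' ∉ List.take (rn - (i + 1)) (cur.drop (i + 1)) := by
        intro hmem
        obtain ⟨k, hk, hke⟩ := List.mem_iff_getElem.1 hmem
        rw [hpre_len] at hk
        rw [List.getElem_take, List.getElem_drop] at hke
        have hstr := hstrict (i + 1 + k) (by omega) (by omega)
        rw [hrnv, List.getD_eq_getElem cur ' ' (by omega : i + 1 + k < cur.length), hke] at hstr
        exact lt_irrefl _ hstr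
      have hidx : PySem.List.index? (cur.drop (i + 1)) (t.getD i ' ') = some (rn - (i + 1)) :=
        (PySem.List.index?_eq_some_iff _ _ _).2
          ⟨List.take (rn - (i + 1)) (cur.drop (i + 1)), cur.drop (rn + 1), hdec, hpre_len, hnotmem⟩
      -- A's step
      have hA : sortiStepA (cs.length : Int) (cur, np) (i : Nat) =
          (cur.take i ++ t.getD i ' ' :: (List.take (rn - (i + 1)) (cur.drop (i + 1))
            ++ cur.getD i ' ' :: cur.drop (rn + 1)), np + 1) := by
        simp only [sortiStepA]
        rw [(by push_cast; ring : ((i : Nat) : Int) + 1 = ((i + 1 : Nat) : Int)),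
          pvRange_natCast (cs.length - (i + 1)) (i + 1) cs.length (by omega)]
        rw [show cur = (cur, np).1 from rfl] at hfold
        rw [hfold]
        rw [if_pos (by exact_mod_cast fun h => absurd (Nat.cast_injective h) (by omega))]
        congr 1
        have ecurrn : PySem.List.pyGet? cur (rn : Nat) = some (cur.getD rn ' ') := by
          rw [PySem.List.pyGet?_natCast, List.getElem?_eq_getElem hrnl,
            List.getD_eq_getElem cur ' ' hrnl]
        rw [PySem.List.slice_to_natCast, ecurrn, ecuri,
          (by push_cast; ring : ((rn : Nat) : Int) + 1 = ((rn + 1 : Nat) : Int)),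
          PySem.List.slice_natCast, PySem.List.slice_from_natCast, hrnv]
        simp
      -- B's step
      have hB : sortiStepB t (cur, np) (i : Nat) =
          (cur.take i ++ t.getD i ' ' :: (List.take (rn - (i + 1)) (cur.drop (i + 1))
            ++ cur.getD i ' ' :: cur.drop (rn + 1)), np + 1) := by
        simp only [sortiStepB]
        simp only [ecuri, eti]
        rw [if_pos hcase]
        rw [(by push_cast; ring : ((i : Nat) : Int) + 1 = ((i + 1 : Nat) : Int)),
          PySem.List.slice_from_natCast, hidx]
        have hm : ((i + 1 : Nat) : Int) + ((rn - (i + 1) : Nat) : Int) = ((rn : Nat) : Int) := by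
          push_cast [Nat.cast_sub (by omega : i + 1 ≤ rn)]; ring
        rw [show (Option.getD (some (rn - (i + 1))) 0) = rn - (i + 1) from rfl, hm,
          Int.toNat_natCast, Int.toNat_natCast]
        rw [← hrnv, pvSwap_concat cur i rn hirn hrnl]
      rw [hA, hB]
      -- re-establish the invariant at i+1
      have hcur_dec : cur = cur.take i ++ cur.getD i ' ' :: (List.take (rn - (i + 1)) (cur.drop (i + 1))
          ++ t.getD i ' ' :: cur.drop (rn + 1)) := by
        conv_lhs => rw [← List.take_append_drop i cur, List.drop_eq_getElem_cons hi, hdec]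
        rw [← List.getD_eq_getElem cur ' ' hi]
      have hperm' : (cur.take i ++ t.getD i ' ' :: (List.take (rn - (i + 1)) (cur.drop (i + 1))
          ++ cur.getD i ' ' :: cur.drop (rn + 1))).Perm t := by
        refine List.Perm.trans ?_ hp
        refine List.Perm.trans (List.Perm.append_left (cur.take i)
          (pvPerm_swap (t.getD i ' ') (cur.getD i ' ') _ _)) ?_
        rw [← hcur_dec]
      have htake' : (cur.take i ++ t.getD i ' ' :: (List.take (rn - (i + 1)) (cur.drop (i + 1))
          ++ cur.getD i ' ' :: cur.drop (rn + 1))).take (i + 1) = t.take (i + 1) := by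
        have hlen2 : (cur.take i ++ [t.getD i ' ']).length = i + 1 := by
          simp [List.length_take]; omega
        calc (cur.take i ++ t.getD i ' ' :: (List.take (rn - (i + 1)) (cur.drop (i + 1))
              ++ cur.getD i ' ' :: cur.drop (rn + 1))).take (i + 1)
            = ((cur.take i ++ [t.getD i ' ']) ++ (List.take (rn - (i + 1)) (cur.drop (i + 1))
              ++ cur.getD i ' ' :: cur.drop (rn + 1))).take (i + 1) := by simp
          _ = cur.take i ++ [t.getD i ' '] := List.take_left' hlen2
          _ = t.take (i + 1) := by
              rw [ht, List.take_add_one, List.getElem?_eq_getElem hti,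
                ← List.getD_eq_getElem t ' ' hti]
              simp
      exact ih (i + 1) _ (np + 1) (by omega) hperm' htake'

-- ===== VERDICT (by name: the statement is the Claim_ definition above) =====
theorem sorti_spec : Claim_equal_sorti := by
  intro s _
  unfold Spec_sorti
  show sorti s = sorti_alt s
  rcases Nat.eq_zero_or_pos s.toList.length with h0 | hpos
  · have hnil : s.toList = [] := List.eq_nil_of_length_eq_zero h0
    simp only [sorti, sorti_alt, hnil]
    rw [pvRange_nil (by norm_num)]
    simp [PySem.List.sorted]
  · have hcast : ((s.toList.length : Int) - 1) = ((s.toList.length - 1 : Nat) : Int) := by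
      push_cast [Nat.cast_sub hpos]; ring
    obtain ⟨r, hA, hB⟩ := pvMain s.toList (s.toList.length - 1) 0 s.toList 0 (by omega)
      (PySem.List.sorted_perm _ _ _).symm (by simp)
    simp only [sorti, sorti_alt]
    have h0' := pvRange_natCast (s.toList.length - 1) 0 (s.toList.length - 1) (by omega)
    rw [Nat.cast_zero] at h0'
    rw [hcast, h0', hA, hB]
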